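-- pv_equiv track=rewrite | github.com/wjyoumans/multiproc | src/multiproc.py | gen_cmds
-- ===== SOURCE A (Python) =====
-- from itertools import product, repeat
--
-- def gen_cmds(cmd, modifiers):
--     """ Create a generator for modified commands."""
--
--     # only support modifiers %0-%9
--     if modifiers is None:
--         yield cmd, "mp.out"
--     else:
--         assert len(modifiers) < 11
--
--         products = product(*modifiers)
--         x = ["%"+str(i) for i in range(len(modifiers))]
--         for prod in products:
--             suffix = "".join(["_"+str(i) for i in list(prod)])
--
--             new_cmd = cmd
--             s = [str(p) for p in prod]
--             for sub in zip(x, s):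
--                 new_cmd = new_cmd.replace(*sub)
--
--             yield new_cmd, "mp"+suffix+".out"
-- ===== SOURCE B (Python) =====
-- def gen_cmds(cmd, modifiers):
--     """ Create a generator for modified commands."""
--     if modifiers is None:
--         yield cmd, "mp.out"
--         return
--     assert len(modifiers) < 11
--
--     def rec(i, cur, suffix):
--         if i == len(modifiers):
--             yield cur, "mp" + suffix + ".out"
--         else:
--             for val in modifiers[i]:
--                 yield from rec(i + 1,
--                                cur.replace("%" + str(i), str(val)),
--                                suffix + "_" + str(val))
--
--     yield from rec(0, cmd, "")
-- ===== Notes on version B (the rewrite author's own statement) =====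
-- stated objective: alternative
-- what changed: Replaces the itertools.product enumeration plus per-tuple suffix-join and sequential replace passes with a recursive generator that threads the partially substituted command and suffix through one descent over the modifier lists.
import Mathlib
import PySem

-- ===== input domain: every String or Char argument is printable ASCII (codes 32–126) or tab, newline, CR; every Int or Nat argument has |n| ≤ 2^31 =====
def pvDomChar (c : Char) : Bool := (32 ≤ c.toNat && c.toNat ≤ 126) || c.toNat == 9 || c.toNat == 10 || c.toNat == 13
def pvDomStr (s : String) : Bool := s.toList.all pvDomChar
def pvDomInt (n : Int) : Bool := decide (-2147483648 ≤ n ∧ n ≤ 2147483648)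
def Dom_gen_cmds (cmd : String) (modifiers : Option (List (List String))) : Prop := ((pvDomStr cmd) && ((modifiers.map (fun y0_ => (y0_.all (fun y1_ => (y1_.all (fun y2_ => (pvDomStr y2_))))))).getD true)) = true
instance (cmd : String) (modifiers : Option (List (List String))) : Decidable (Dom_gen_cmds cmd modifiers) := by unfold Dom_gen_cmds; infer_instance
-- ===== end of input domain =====

-- B replaces itertools.product + flat substitution passes by a recursive generator over
-- the modifier lists that threads the partially substituted command and suffix (objective: alternative).

-- ===== PORT A =====
-- itertools.product(*modifiers): first list varies slowest (Python's order)
def pyProductA : List (List String) → List (List String)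
  | [] => [[]]
  | l :: ls => l.flatMap (fun v => (pyProductA ls).map (v :: ·))

def gen_cmds (cmd : String) (modifiers : Option (List (List String))) : List (String × String) :=
  match modifiers with
  | none => [(cmd, "mp.out")]
  | some ms =>
    if ms.length < 11 then
      let products := pyProductA ms
      let x := (List.range ms.length).map (fun i => "%" ++ PySem.Int.toStr (Int.ofNat i))
      products.map (fun prod =>
        let suffix := PySem.Str.join "" (prod.map (fun v => "_" ++ v))
        let s := prod  -- str(p) is the identity on strings
        let new_cmd := (x.zip s).foldl (fun c (p : String × String) => PySem.Str.replace c p.1 p.2) cmd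
        (new_cmd, "mp" ++ suffix ++ ".out"))
    else []  -- assert fails (AssertionError); excluded by Pre_gen_cmds

-- ===== PORT B =====
-- rec(i, cur, suffix): structural recursion over the remaining modifier lists, i the current index
def genRecB : List (List String) → Nat → String → String → List (String × String)
  | [], _, cur, suffix => [(cur, "mp" ++ suffix ++ ".out")]
  | vs :: rest, i, cur, suffix =>
    vs.flatMap (fun v =>
      genRecB rest (i + 1) (PySem.Str.replace cur ("%" ++ PySem.Int.toStr (Int.ofNat i)) v) (suffix ++ "_" ++ v))

def gen_cmds_alt (cmd : String) (modifiers : Option (List (List String))) : List (String × String) :=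
  match modifiers with
  | none => [(cmd, "mp.out")]
  | some ms =>
    if ms.length < 11 then
      genRecB ms 0 cmd ""
    else []  -- assert fails; excluded by Pre_gen_cmds

-- ===== PRECONDITION & SPEC =====
-- A (and B) raise AssertionError when len(modifiers) >= 11; Pre_ excludes exactly those inputs.
def Pre_gen_cmds (cmd : String) (modifiers : Option (List (List String))) : Prop :=
  (match modifiers with
   | none => true
   | some ms => decide (ms.length < 11)) = true
instance (cmd : String) (modifiers : Option (List (List String))) : Decidable (Pre_gen_cmds cmd modifiers) := by unfold Pre_gen_cmds; infer_instance

def pvWitness_gen_cmds : String × Option (List (List String)) := ("echo %0 %1", some [["a", "b"], ["c"]])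

def Spec_gen_cmds (cmd : String) (modifiers : Option (List (List String))) (out : List (String × String)) : Prop := out = gen_cmds_alt cmd modifiers
instance (cmd : String) (modifiers : Option (List (List String))) (out : List (String × String)) : Decidable (Spec_gen_cmds cmd modifiers out) := by unfold Spec_gen_cmds; infer_instance

-- ===== CLAIM (what is proved, stated in full; the proofs are below) =====
def Claim_equal_gen_cmds : Prop := ∀ (cmd : String) (modifiers : Option (List (List String))), Dom_gen_cmds cmd modifiers → Pre_gen_cmds cmd modifiers → Spec_gen_cmds cmd modifiers (gen_cmds cmd modifiers)

-- ===== LEMMAS AND PROOFS =====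

theorem join_nil_cons (x : List Char) (xs : List (List Char)) :
    PySem.Chars.join [] (x :: xs) = x ++ PySem.Chars.join [] xs := by
  cases xs with
  | nil => simp [PySem.Chars.join_singleton, PySem.Chars.join_nil]
  | cons y ys => simp [PySem.Chars.join_cons_cons]

-- B's recursion computes A's map over the cartesian product, with placeholder indices shifted by i.
theorem genRecB_eq (rest : List (List String)) (i : Nat) (cur suffix : String) :
    genRecB rest i cur suffix =
      (pyProductA rest).map (fun prod =>
        (((List.range rest.length).map (fun j => "%" ++ PySem.Int.toStr (Int.ofNat (i + j)))).zip prod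
            |>.foldl (fun c (p : String × String) => PySem.Str.replace c p.1 p.2) cur,
         "mp" ++ (suffix ++ PySem.Str.join "" (prod.map (fun v => "_" ++ v))) ++ ".out")) := by
  induction rest generalizing i cur suffix with
  | nil =>
    simp [genRecB, pyProductA, PySem.Str.join]
  | cons vs rest ih =>
    simp only [genRecB, pyProductA, List.map_flatMap, List.map_map]
    refine List.flatMap_congr (fun v _ => ?_)
    rw [ih]
    refine List.map_congr_left (fun prod _ => ?_)
    have hrange : List.range (vs :: rest).length.pred.succ = 0 :: (List.range rest.length).map Nat.succ := by
      simp [List.range_succ_eq_map]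
    simp only [List.length_cons, List.range_succ_eq_map, List.map_cons, List.map_map,
      Function.comp, List.zip_cons_cons, List.foldl_cons]
    simp only [Prod.mk.injEq]
    refine ⟨?_, ?_⟩
    · have h : (fun j => "%" ++ PySem.Int.toStr (Int.ofNat (i + 1 + j)))
             = ((fun j => "%" ++ PySem.Int.toStr (Int.ofNat (i + j))) ∘ Nat.succ) := by
        funext j
        have : i + 1 + j = i + j.succ := by omega
        simp [Function.comp, this]
      rw [h, Nat.add_zero]
    · rw [← String.toList_inj]
      simp [PySem.Str.join, join_nil_cons]

theorem gen_cmds_spec : Claim_equal_gen_cmds := by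
  intro cmd modifiers _ hpre
  unfold Spec_gen_cmds
  cases modifiers with
  | none => rfl
  | some ms =>
    have hlen : ms.length < 11 := by
      simpa [Pre_gen_cmds] using hpre
    simp only [gen_cmds, gen_cmds_alt, if_pos hlen]
    rw [genRecB_eq]
    refine List.map_congr_left (fun prod _ => ?_)
    simp only [Prod.mk.injEq, Nat.zero_add]
    refine ⟨trivial, ?_⟩
    rw [← String.toList_inj]
    simp
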